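-- pv_equiv track=rewrite | github.com/kpbaks/latexutils | utils.py | get_column_number_in_document
-- ===== SOURCE A (Python) =====
-- from typing import Any, Callable, Dict, List, Optional, Set, Tuple, Union
--
-- def get_column_number_in_document(document: List[str], index: int) -> Optional[int]:
--
--     assert 0 <= index, f"index must be >= 0, not {index}"
--
--     indices_passed: int = 0
--     for line in document:
--         if indices_passed + len(line) > index:
--             return index - indices_passed + 1
--         indices_passed += len(line)
--
--     return None
-- ===== SOURCE B (Python) =====
-- def get_column_number_in_document(document, index):
--     assert 0 <= index, f"index must be >= 0, not {index}"
--     # prefix table of cumulative end offsets of the lines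
--     ends = []
--     total = 0
--     for line in document:
--         total += len(line)
--         ends.append(total)
--     # binary search (bisect_right): first position whose end strictly exceeds index
--     lo, hi = 0, len(ends)
--     while lo < hi:
--         mid = (lo + hi) // 2
--         if ends[mid] <= index:
--             lo = mid + 1
--         else:
--             hi = mid
--     if lo == len(document):
--         return None
--     prev = ends[lo - 1] if lo > 0 else 0
--     return index - prev + 1
-- ===== Notes on version B (the rewrite author's own statement) =====
-- stated objective: alternative
-- what changed: Replaces A's single running-offset scan by a precomputed prefix-sum table of line end offsets plus a binary search (bisect_right by hand) for the first line whose cumulative end exceeds the index.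
import Mathlib
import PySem

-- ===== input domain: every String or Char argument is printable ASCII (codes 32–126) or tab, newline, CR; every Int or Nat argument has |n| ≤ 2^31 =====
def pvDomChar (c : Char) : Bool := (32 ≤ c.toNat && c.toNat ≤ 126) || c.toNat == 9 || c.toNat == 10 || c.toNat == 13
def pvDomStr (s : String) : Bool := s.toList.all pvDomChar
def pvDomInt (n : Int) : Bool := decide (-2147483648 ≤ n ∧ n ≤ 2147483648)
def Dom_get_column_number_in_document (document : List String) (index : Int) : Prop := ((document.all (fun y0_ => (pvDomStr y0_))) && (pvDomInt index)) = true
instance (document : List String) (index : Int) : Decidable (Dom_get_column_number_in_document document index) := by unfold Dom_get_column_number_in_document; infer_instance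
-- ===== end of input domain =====

-- B replaces A's single running-offset scan by a prefix table of line end offsets
-- plus a binary search for the first end exceeding the index (alternative, not faster).

-- ===== PORT A =====
-- the for-loop with the running accumulator indices_passed
def pvGoA : List String → Int → Int → Option Int
  | [], _, _ => none
  | line :: rest, index, passed =>
    if passed + PySem.Str.len line > index then some (index - passed + 1)
    else pvGoA rest index (passed + PySem.Str.len line)

def get_column_number_in_document (document : List String) (index : Int) : Option Int :=
  pvGoA document index 0

-- ===== PORT B =====
-- the prefix table: ends[i] = total length of lines 0..i (accumulator total)
def pvBuildEnds : List String → Int → List Int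
  | [], _ => []
  | line :: rest, total => (total + PySem.Str.len line) :: pvBuildEnds rest (total + PySem.Str.len line)

-- the while loop: hand-written bisect_right; ends[mid] is in range whenever hi ≤ ends.length
def pvBisect (ends : List Int) (index : Int) (lo hi : Nat) : Nat :=
  if _h : lo < hi then
    let mid := (lo + hi) / 2
    if ends.getD mid 0 ≤ index then pvBisect ends index (mid + 1) hi
    else pvBisect ends index lo mid
  else lo
termination_by hi - lo
decreasing_by all_goals omega

def get_column_number_in_document_alt (document : List String) (index : Int) : Option Int :=
  let ends := pvBuildEnds document 0
  let pos := pvBisect ends index 0 ends.length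
  if pos = document.length then none
  else some (index - (if 0 < pos then ends.getD (pos - 1) 0 else 0) + 1)

-- ===== PRECONDITION & SPEC =====
-- A (and B) raise AssertionError for index < 0; Pre_ excludes exactly those inputs.
def Pre_get_column_number_in_document (document : List String) (index : Int) : Prop := 0 ≤ index
instance (document : List String) (index : Int) : Decidable (Pre_get_column_number_in_document document index) := by unfold Pre_get_column_number_in_document; infer_instance
def pvWitness_get_column_number_in_document : List String × Int := (["ab", "c"], 2)

def Spec_get_column_number_in_document (document : List String) (index : Int) (out : Option Int) : Prop := out = get_column_number_in_document_alt document index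
instance (document : List String) (index : Int) (out : Option Int) : Decidable (Spec_get_column_number_in_document document index out) := by unfold Spec_get_column_number_in_document; infer_instance

-- ===== CLAIM (what is proved, stated in full; the proofs are below) =====
def Claim_equal_get_column_number_in_document : Prop := ∀ (document : List String) (index : Int), Dom_get_column_number_in_document document index → Pre_get_column_number_in_document document index → Spec_get_column_number_in_document document index (get_column_number_in_document document index)

-- ===== LEMMAS AND PROOFS =====

theorem pv_len_nonneg (s : String) : 0 ≤ PySem.Str.len s := by
  rw [PySem.Str.len_eq]; exact Int.natCast_nonneg _

theorem pvBuildEnds_shift (doc : List String) (t : Int) :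
    pvBuildEnds doc t = (pvBuildEnds doc 0).map (t + ·) := by
  induction doc generalizing t with
  | nil => simp [pvBuildEnds]
  | cons l rest ih =>
    rw [pvBuildEnds, pvBuildEnds, ih (t + PySem.Str.len l), ih (0 + PySem.Str.len l)]
    simp only [List.map_cons, List.map_map, zero_add]
    refine congrArg₂ _ (by ring) ?_
    apply List.map_congr_left; intro x _; simp only [Function.comp_apply]; ring

theorem pvBuildEnds_cons (l : String) (rest : List String) :
    pvBuildEnds (l :: rest) 0 =
      (PySem.Str.len l) :: (pvBuildEnds rest 0).map ((PySem.Str.len l) + ·) := by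
  rw [pvBuildEnds, pvBuildEnds_shift rest]
  simp only [zero_add]

theorem pvBuildEnds_length (doc : List String) (t : Int) :
    (pvBuildEnds doc t).length = doc.length := by
  induction doc generalizing t with
  | nil => rfl
  | cons l rest ih => simp [pvBuildEnds, ih]

theorem pvBuildEnds_nonneg (doc : List String) :
    ∀ x ∈ pvBuildEnds doc 0, 0 ≤ x := by
  induction doc with
  | nil => simp [pvBuildEnds]
  | cons l rest ih =>
    intro x hx
    rw [pvBuildEnds_cons] at hx
    rcases List.mem_cons.mp hx with h | h
    · subst h; exact pv_len_nonneg l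
    · obtain ⟨y, hy, rfl⟩ := List.mem_map.mp h
      have h1 := ih y hy
      have h2 := pv_len_nonneg l
      omega

theorem pvBuildEnds_sorted (doc : List String) :
    (pvBuildEnds doc 0).Pairwise (· ≤ ·) := by
  induction doc with
  | nil => simp [pvBuildEnds]
  | cons l rest ih =>
    rw [pvBuildEnds_cons]
    refine List.pairwise_cons.mpr ⟨?_, ?_⟩
    · intro x hx
      obtain ⟨y, hy, rfl⟩ := List.mem_map.mp hx
      have := pvBuildEnds_nonneg rest y hy
      omega
    · exact ih.map _ (fun a b h => by omega)

theorem pv_sorted_getD (ends : List Int) (hs : ends.Pairwise (· ≤ ·))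
    (i j : Nat) (hij : i ≤ j) (hj : j < ends.length) :
    ends.getD i 0 ≤ ends.getD j 0 := by
  rcases Nat.eq_or_lt_of_le hij with rfl | hlt
  · exact le_refl _
  · have hi : i < ends.length := lt_trans hlt hj
    rw [List.getD_eq_getElem ends 0 hi, List.getD_eq_getElem ends 0 hj]
    exact List.pairwise_iff_getElem.mp hs i j hi hj hlt

theorem pvBisect_spec (ends : List Int) (index : Int)
    (hs : ends.Pairwise (· ≤ ·)) :
    ∀ n lo hi, hi - lo ≤ n → lo ≤ hi → hi ≤ ends.length →
    (∀ j, j < lo → ends.getD j 0 ≤ index) →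
    (∀ j, hi ≤ j → j < ends.length → index < ends.getD j 0) →
    pvBisect ends index lo hi ≤ ends.length ∧
    (∀ j, j < pvBisect ends index lo hi → ends.getD j 0 ≤ index) ∧
    (∀ j, pvBisect ends index lo hi ≤ j → j < ends.length → index < ends.getD j 0) := by
  intro n
  induction n with
  | zero =>
    intro lo hi hfuel hlohi hhi hlow hhigh
    have heq : lo = hi := by omega
    subst heq
    rw [pvBisect]
    rw [dif_neg (lt_irrefl lo)]
    exact ⟨le_trans hlohi hhi, hlow, hhigh⟩
  | succ n ih =>
    intro lo hi hfuel hlohi hhi hlow hhigh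
    rw [pvBisect]
    by_cases h : lo < hi
    · rw [dif_pos h]
      by_cases hc : ends.getD ((lo + hi) / 2) 0 ≤ index
      · rw [if_pos hc]
        exact ih ((lo + hi) / 2 + 1) hi (by omega) (by omega) hhi
          (fun j hj => le_trans (pv_sorted_getD ends hs j ((lo + hi) / 2) (by omega)
            (by omega)) hc) hhigh
      · rw [if_neg hc]
        push Not at hc
        exact ih lo ((lo + hi) / 2) (by omega) (by omega) (by omega) hlow
          (fun j hj hjl => lt_of_lt_of_le hc (pv_sorted_getD ends hs ((lo + hi) / 2) j hj hjl))
    · rw [dif_neg h]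
      have heq : lo = hi := by omega
      subst heq
      exact ⟨le_trans hlohi hhi, hlow, hhigh⟩

theorem pvGoA_shift (doc : List String) (i p : Int) :
    pvGoA doc i p = pvGoA doc (i - p) 0 := by
  induction doc generalizing i p with
  | nil => rfl
  | cons x xs ih =>
    simp only [pvGoA, zero_add]
    by_cases hb : p + PySem.Str.len x > i
    · rw [if_pos hb, if_pos (by omega)]
      congr 1; omega
    · rw [if_neg hb, if_neg (by omega), ih i (p + PySem.Str.len x), ih (i - p) (PySem.Str.len x)]
      congr 1; ring

-- the main characterization: any position r with the bisect properties determines A's answer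
theorem pvGoA_char (doc : List String) (index : Int) (r : Nat)
    (hr : r ≤ (pvBuildEnds doc 0).length)
    (hlow : ∀ j, j < r → (pvBuildEnds doc 0).getD j 0 ≤ index)
    (hhigh : ∀ j, r ≤ j → j < (pvBuildEnds doc 0).length → index < (pvBuildEnds doc 0).getD j 0) :
    pvGoA doc index 0 =
      if r = doc.length then none
      else some (index - (if 0 < r then (pvBuildEnds doc 0).getD (r - 1) 0 else 0) + 1) := by
  induction doc generalizing index r with
  | nil =>
    have hr0 : r = 0 := by
      have := hr; simp [pvBuildEnds] at this; omega
    subst hr0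
    simp [pvGoA]
  | cons l rest ih =>
    rw [pvBuildEnds_cons] at hr hlow hhigh
    have hlen' : (pvBuildEnds rest 0).length = rest.length := pvBuildEnds_length rest 0
    have hlenc : ((PySem.Str.len l) :: (pvBuildEnds rest 0).map ((PySem.Str.len l) + ·)).length
        = rest.length + 1 := by simp [hlen']
    have hgetD : ∀ j : Nat, j < rest.length →
        ((PySem.Str.len l) :: (pvBuildEnds rest 0).map ((PySem.Str.len l) + ·)).getD (j + 1) 0
          = PySem.Str.len l + (pvBuildEnds rest 0).getD j 0 := by
      intro j hj
      rw [List.getD_cons_succ]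
      rw [List.getD_eq_getElem _ 0 (by simpa [hlen'] using hj),
          List.getD_eq_getElem _ 0 (by omega)]
      simp
    by_cases hcase : PySem.Str.len l > index
    · -- first line already covers index: r must be 0
      have hr0 : r = 0 := by
        by_contra hne
        have h0 := hlow 0 (by omega)
        rw [List.getD_cons_zero] at h0
        omega
      subst hr0
      simp only [pvGoA, zero_add, if_pos hcase]
      rw [if_neg (by simp)]
      simp
    · push Not at hcase
      have hr1 : 1 ≤ r := by
        by_contra hlt
        have h0 := hhigh 0 (by omega) (by rw [hlenc]; omega)
        rw [List.getD_cons_zero] at h0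
        omega
      have hrec := ih (index - PySem.Str.len l) (r - 1)
        (by rw [hlen']; rw [hlenc] at hr; omega)
        (by
          intro j hj
          have h1 := hlow (j + 1) (by omega)
          rw [hgetD j (by rw [hlenc] at hr; omega)] at h1
          omega)
        (by
          intro j hj hjl
          have h1 := hhigh (j + 1) (by omega) (by rw [hlenc]; rw [hlen'] at hjl; omega)
          rw [hgetD j (by rwa [hlen'] at hjl)] at h1
          omega)
      simp only [pvGoA, zero_add, if_neg (by omega : ¬ PySem.Str.len l > index)]
      rw [pvGoA_shift rest index (PySem.Str.len l), hrec]
      rw [pvBuildEnds_cons]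
      simp only [List.length_cons]
      rw [hlenc] at hr
      by_cases hend : r = rest.length + 1
      · rw [if_pos (show r - 1 = rest.length by omega), if_pos hend]
      · rw [if_neg (show ¬ r - 1 = rest.length by omega),
            if_neg (show ¬ r = rest.length + 1 by omega)]
        congr 1
        rw [if_pos (show 0 < r by omega)]
        by_cases hr2 : 2 ≤ r
        · rw [if_pos (show 0 < r - 1 by omega)]
          have hstep : r - 1 - 1 + 1 = r - 1 := by omega
          have hget := hgetD (r - 1 - 1) (by omega)
          rw [hstep] at hget
          rw [hget]
          omega
        · have hr1' : r = 1 := by omega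
          subst hr1'
          rw [if_neg (show ¬ (0:Nat) < 1 - 1 by omega)]
          rw [List.getD_cons_zero]
          omega

-- ===== VERDICT (by name: the statement is the Claim_ definition above) =====
theorem get_column_number_in_document_spec : Claim_equal_get_column_number_in_document := by
  intro document index _hdom _hpre
  unfold Spec_get_column_number_in_document
  unfold get_column_number_in_document get_column_number_in_document_alt
  have hs := pvBuildEnds_sorted document
  have hspec := pvBisect_spec (pvBuildEnds document 0) index hs (pvBuildEnds document 0).length
    0 (pvBuildEnds document 0).length (by omega) (by omega) (le_refl _)
    (by omega) (by intro j hj hjl; omega)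
  obtain ⟨h1, h2, h3⟩ := hspec
  exact pvGoA_char document index _ h1 h2 h3
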